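-- pv_equiv track=rewrite | github.com/princetonvisualai/pointingqa | datasets/intentqa/ObjPartUI/examples/weak/notebooks/point_analytics/histograms.py | count_key_freq
-- ===== SOURCE A (Python) =====
-- import collections
--
-- def count_key_freq(rb_key):
--     import copy
--     rb_key_ = copy.deepcopy(rb_key)
--     for k, responses in rb_key_.items():
--         max_freq = 0
--         max_cls = None
--         M = float(len(responses))
--         choices = collections.defaultdict(int)
--         for response in responses:
--             answer = response['answer']
--             choices[answer] += 1
--
--         for cls, freq in choices.items():
--             if freq > max_freq:
--                 max_freq = freq
--                 max_cls = cls
--         # max_clses = set()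
--         # for cls, freq in responses.items():
--         #     if freq == max_freq:
--         #         max_clses.add(cls)
--         if max_freq <= M / 2.0:  # If it's an split, "impossible to tell"
--             max_cls = -3
--         rb_key_[k] = max_cls
--     return rb_key_
-- ===== SOURCE B (Python) =====
-- def count_key_freq(rb_key):
--     # Boyer-Moore majority vote per key + one verification count; builds a fresh dict.
--     result = {}
--     for k, responses in rb_key.items():
--         answers = [r['answer'] for r in responses]
--         cand, cnt = None, 0
--         for a in answers:
--             if cnt == 0:
--                 cand, cnt = a, 1
--             elif a == cand:
--                 cnt += 1
--             else:
--                 cnt -= 1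
--         if cand is not None and answers.count(cand) > len(answers) / 2.0:
--             result[k] = cand
--         else:
--             result[k] = -3
--     return result
-- ===== Notes on version B (the rewrite author's own statement) =====
-- stated objective: alternative
-- what changed: Replaces the per-key frequency dictionary plus max-scan (and the deepcopy of the whole input) by a Boyer-Moore majority vote with a single verification count, writing results into a fresh dict.
import Mathlib
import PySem

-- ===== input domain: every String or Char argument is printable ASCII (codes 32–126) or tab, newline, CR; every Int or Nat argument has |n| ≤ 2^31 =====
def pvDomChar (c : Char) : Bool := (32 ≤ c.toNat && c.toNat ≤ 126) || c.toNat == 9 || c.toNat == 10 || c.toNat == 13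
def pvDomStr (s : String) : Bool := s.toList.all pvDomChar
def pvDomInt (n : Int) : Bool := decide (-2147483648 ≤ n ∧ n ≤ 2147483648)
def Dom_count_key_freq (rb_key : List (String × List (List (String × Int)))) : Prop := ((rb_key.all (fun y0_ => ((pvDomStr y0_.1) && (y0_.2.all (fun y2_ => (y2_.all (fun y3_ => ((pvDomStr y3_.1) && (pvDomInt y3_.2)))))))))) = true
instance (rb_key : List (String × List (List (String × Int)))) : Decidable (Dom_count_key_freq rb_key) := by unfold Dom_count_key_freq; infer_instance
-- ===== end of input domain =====

-- B replaces A's per-key frequency dict + max-scan (and the deepcopy) by a Boyer-Moore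
-- majority vote with one verification count (same result, less per-key state).
-- A deepcopies its argument and mutates only the copy, so no caller-visible mutation occurs.

-- ===== PORT A =====
-- Python's `max_freq <= M / 2.0` compares an int count against len/2 in float; on this
-- domain (counts ≤ list length < 2^53) the float comparison is exact, ported as 2*max_freq ≤ M.
-- `response['answer']` raises KeyError when missing — excluded by Pre_; the getD default 0
-- is never consulted inside Pre_.  max_cls is None (ported: none) only while max_freq = 0,
-- in which case the -3 branch is taken; `.getD (-3)` is the unreachable None case.
def count_key_freq (rb_key : List (String × List (List (String × Int)))) : List (String × Int) :=
  (PySem.Dict.ofList rb_key).items.map (fun kv =>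
    let responses := kv.2
    let M : Int := PySem.List.len responses
    let choices : PySem.Dict Int Int :=
      responses.foldl (fun d r => d.modify ((PySem.Dict.ofList r).getD "answer" 0) 0 (· + 1))
        PySem.Dict.empty
    let m : Int × Option Int :=
      choices.items.foldl (fun acc p => if p.2 > acc.1 then (p.2, some p.1) else acc) (0, none)
    (kv.1, if 2 * m.1 ≤ M then -3 else m.2.getD (-3)))

-- ===== PORT B =====
-- `answers.count(cand) > len(answers) / 2.0` is exact on this domain, ported as an integer
-- comparison; `cand is not None and …` is the `match` on the candidate option.
def count_key_freq_alt (rb_key : List (String × List (List (String × Int)))) : List (String × Int) :=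
  (PySem.Dict.ofList rb_key).items.map (fun kv =>
    let answers := kv.2.map (fun r => (PySem.Dict.ofList r).getD "answer" 0)
    let s : Option Int × Int :=
      answers.foldl (fun s a =>
        if s.2 = 0 then (some a, 1)
        else if some a = s.1 then (s.1, s.2 + 1)
        else (s.1, s.2 - 1)) (none, 0)
    (kv.1, match s.1 with
      | none => -3
      | some c => if 2 * (PySem.List.count answers c : Int) > PySem.List.len answers then c
                  else -3))

-- ===== PRECONDITION & SPEC =====
-- A raises KeyError on response dicts without an 'answer' key; Pre_ requires every response
-- (of every key that survives Python's dict construction) to carry it.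
def Pre_count_key_freq (rb_key : List (String × List (List (String × Int)))) : Prop :=
  ∀ p ∈ (PySem.Dict.ofList rb_key).items, ∀ r ∈ p.2, ("answer" ∈ r.map Prod.fst)
instance (rb_key : List (String × List (List (String × Int)))) : Decidable (Pre_count_key_freq rb_key) := by unfold Pre_count_key_freq; infer_instance
def pvWitness_count_key_freq : (List (String × List (List (String × Int)))) :=
  [("q1", [[("answer", 2)], [("answer", 2)], [("answer", 5)]]), ("q2", [])]

def Spec_count_key_freq (rb_key : List (String × List (List (String × Int)))) (out : List (String × Int)) : Prop := out = count_key_freq_alt rb_key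
instance (rb_key : List (String × List (List (String × Int)))) (out : List (String × Int)) : Decidable (Spec_count_key_freq rb_key out) := by unfold Spec_count_key_freq; infer_instance

-- ===== CLAIM (what is proved, stated in full; the proofs are below) =====
def Claim_equal_count_key_freq : Prop := ∀ (rb_key : List (String × List (List (String × Int)))), Dom_count_key_freq rb_key → Pre_count_key_freq rb_key → Spec_count_key_freq rb_key (count_key_freq rb_key)

-- ===== LEMMAS AND PROOFS =====

-- two distinct values cannot both occur more than half the time
lemma count_pair_le_length (l : List Int) (x y : Int) (h : x ≠ y) :
    l.count x + l.count y ≤ l.length := by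
  induction l with
  | nil => simp
  | cons a t ih => simp [List.count_cons]; split_ifs with h1 h2 <;> simp_all <;> omega

-- A's max-scan: the result is the start state or (freq, key) of some scanned item,
-- and its first component dominates the start and every scanned frequency.
lemma scan_spec (l : List (Int × Int)) (acc : Int × Option Int) :
    (l.foldl (fun acc p => if p.2 > acc.1 then (p.2, some p.1) else acc) acc = acc
      ∨ ∃ p ∈ l, l.foldl (fun acc p => if p.2 > acc.1 then (p.2, some p.1) else acc) acc = (p.2, some p.1))
    ∧ acc.1 ≤ (l.foldl (fun acc p => if p.2 > acc.1 then (p.2, some p.1) else acc) acc).1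
    ∧ ∀ p ∈ l, p.2 ≤ (l.foldl (fun acc p => if p.2 > acc.1 then (p.2, some p.1) else acc) acc).1 := by
  induction l generalizing acc with
  | nil => simp
  | cons a t ih =>
    simp only [List.foldl_cons]
    by_cases hgt : a.2 > acc.1
    · simp only [if_pos hgt]
      obtain ⟨h1, h2, h3⟩ := ih (a.2, some a.1)
      refine ⟨?_, by simpa using le_trans (le_of_lt hgt) h2, ?_⟩
      · rcases h1 with h1 | ⟨p, hp, hp2⟩
        · exact Or.inr ⟨a, by simp, h1⟩
        · exact Or.inr ⟨p, by simp [hp], hp2⟩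
      · intro p hp
        rcases List.mem_cons.mp hp with rfl | hp
        · exact le_trans (by simp) h2
        · exact h3 p hp
    · simp only [if_neg hgt]
      obtain ⟨h1, h2, h3⟩ := ih acc
      refine ⟨?_, h2, ?_⟩
      · rcases h1 with h1 | ⟨p, hp, hp2⟩
        · exact Or.inl h1
        · exact Or.inr ⟨p, by simp [hp], hp2⟩
      · intro p hp
        rcases List.mem_cons.mp hp with rfl | hp
        · exact le_trans (le_of_not_gt hgt) h2
        · exact h3 p hp

-- Boyer-Moore invariant: any value other than the final candidate occurs in at most
-- half of (the list plus k virtual copies of the current candidate).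
lemma bm_inv (l : List Int) (co : Option Int) (k : Int) (x : Int) (hk : 0 ≤ k) :
    0 ≤ (l.foldl (fun s a =>
        if s.2 = 0 then (some a, 1)
        else if some a = s.1 then (s.1, s.2 + 1)
        else (s.1, s.2 - 1)) (co, k)).2 ∧
    ((l.foldl (fun s a =>
        if s.2 = 0 then (some a, 1)
        else if some a = s.1 then (s.1, s.2 + 1)
        else (s.1, s.2 - 1)) (co, k)).1 ≠ some x →
      2 * (l.count x : Int) + (if co = some x then 2 * k else 0)
        + (l.foldl (fun s a =>
            if s.2 = 0 then (some a, 1)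
            else if some a = s.1 then (s.1, s.2 + 1)
            else (s.1, s.2 - 1)) (co, k)).2 ≤ k + l.length) := by
  induction l generalizing co k with
  | nil =>
    refine ⟨hk, fun hne => ?_⟩
    simp only [List.foldl_nil] at hne ⊢
    rw [if_neg hne]
    simp
  | cons a t ih =>
    simp only [List.foldl_cons, List.length_cons]
    by_cases h0 : k = 0
    · subst h0
      obtain ⟨ih1, ih2⟩ := ih (some a) 1 (by omega)
      refine ⟨ih1, fun hne => ?_⟩
      have h2' := ih2 hne
      by_cases hax : a = x <;> by_cases hco : co = some x <;>
        simp [hax, hco] at h2' ⊢ <;> omega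
    · simp only [if_neg h0]
      by_cases hac : some a = co
      · simp only [if_pos hac]
        obtain ⟨ih1, ih2⟩ := ih co (k + 1) (by omega)
        refine ⟨ih1, fun hne => ?_⟩
        have h2' := ih2 hne
        by_cases hax : a = x <;> by_cases hco : co = some x <;>
          simp [hax, hco] at h2' ⊢ <;> simp_all <;> omega
      · simp only [if_neg hac]
        obtain ⟨ih1, ih2⟩ := ih co (k - 1) (by omega)
        refine ⟨ih1, fun hne => ?_⟩
        have h2' := ih2 hne
        by_cases hax : a = x <;> by_cases hco : co = some x <;>
          simp [hax, hco] at h2' ⊢ <;> simp_all <;> omega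

-- a strict majority forces the Boyer-Moore candidate
lemma bm_majority (l : List Int) (x : Int) (hx : (l.length : Int) < 2 * l.count x) :
    (l.foldl (fun s a =>
        if s.2 = 0 then (some a, 1)
        else if some a = s.1 then (s.1, s.2 + 1)
        else (s.1, s.2 - 1)) ((none, 0) : Option Int × Int)).1 = some x := by
  by_contra hne
  obtain ⟨h1, h2⟩ := bm_inv l none 0 x le_rfl
  have h3 := h2 hne
  simp at h3
  omega

-- per-key agreement: A's dict-count + max-scan equals B's vote + verify
lemma perKey (responses : List (List (String × Int))) :
    (let M : Int := PySem.List.len responses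
     let choices : PySem.Dict Int Int :=
       responses.foldl (fun d r => d.modify ((PySem.Dict.ofList r).getD "answer" 0) 0 (· + 1))
         PySem.Dict.empty
     let m : Int × Option Int :=
       choices.items.foldl (fun acc p => if p.2 > acc.1 then (p.2, some p.1) else acc) (0, none)
     if 2 * m.1 ≤ M then (-3 : Int) else m.2.getD (-3)) =
    (let answers := responses.map (fun r => (PySem.Dict.ofList r).getD "answer" 0)
     let s : Option Int × Int :=
       answers.foldl (fun s a =>
         if s.2 = 0 then (some a, 1)
         else if some a = s.1 then (s.1, s.2 + 1)
         else (s.1, s.2 - 1)) (none, 0)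
     match s.1 with
     | none => -3
     | some c => if 2 * (PySem.List.count answers c : Int) > PySem.List.len answers then c
                 else -3) := by
  dsimp only
  have hch : (responses.foldl
      (fun d r => d.modify ((PySem.Dict.ofList r).getD "answer" 0) 0 (· + 1)) PySem.Dict.empty)
      = PySem.Dict.counter (responses.map (fun r => (PySem.Dict.ofList r).getD "answer" 0)) := by
    rw [PySem.Dict.counter_eq_foldl, List.foldl_map]
  rw [hch, PySem.Dict.items_counter]
  set answers := responses.map (fun r => (PySem.Dict.ofList r).getD "answer" 0) with hans
  have hlen : responses.length = answers.length := by rw [hans, List.length_map]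
  simp only [PySem.List.len_eq, PySem.List.count_eq, hlen]
  obtain ⟨hform, -, hdom⟩ :=
    scan_spec ((PySem.Set.ofList answers).map (fun k => (k, (List.count k answers : Int))))
      ((0, none) : Int × Option Int)
  by_cases hmaj : ∃ c, c ∈ answers ∧ answers.length < 2 * List.count c answers
  · obtain ⟨c, hcmem, hcmaj⟩ := hmaj
    have hcpos : 0 < List.count c answers := List.count_pos_iff.mpr hcmem
    have hitem : (c, (List.count c answers : Int)) ∈
        (PySem.Set.ofList answers).map (fun k => (k, (List.count k answers : Int))) :=
      List.mem_map.mpr ⟨c, (PySem.Set.mem_ofList _ _).mpr hcmem, rfl⟩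
    have hc_le := hdom _ hitem
    rcases hform with hm | ⟨p, hp, hm⟩
    · rw [hm] at hc_le
      simp at hc_le
      omega
    · obtain ⟨c', hc'mem, rfl⟩ := List.mem_map.mp hp
      rw [hm] at hc_le
      simp only at hc_le
      have hcc : c' = c := by
        by_contra hne
        have := count_pair_le_length answers c' c hne
        omega
      rw [hcc] at hm
      rw [hm, if_neg (by push_cast; omega), bm_majority answers c (by omega)]
      dsimp only
      rw [if_pos (by omega)]
      rfl
  · push Not at hmaj
    have hA : (if 2 * ((((PySem.Set.ofList answers).map
          (fun k => (k, (List.count k answers : Int)))).foldl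
            (fun acc p => if p.2 > acc.1 then (p.2, some p.1) else acc)
            ((0, none) : Int × Option Int)).1) ≤ (answers.length : Int) then (-3 : Int)
        else ((((PySem.Set.ofList answers).map
          (fun k => (k, (List.count k answers : Int)))).foldl
            (fun acc p => if p.2 > acc.1 then (p.2, some p.1) else acc)
            ((0, none) : Int × Option Int)).2).getD (-3)) = -3 := by
      rcases hform with hm | ⟨p, hp, hm⟩
      · rw [hm]
        simp
      · obtain ⟨c', hc'mem, rfl⟩ := List.mem_map.mp hp
        have hc'ans : c' ∈ answers := (PySem.Set.mem_ofList _ _).mp hc'mem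
        rw [hm]
        rw [if_pos (by have := hmaj c' hc'ans; push_cast; omega)]
    rw [hA]
    rcases hs : (answers.foldl (fun s a =>
        if s.2 = 0 then (some a, 1)
        else if some a = s.1 then (s.1, s.2 + 1)
        else (s.1, s.2 - 1)) ((none, 0) : Option Int × Int)).1 with _ | c
    · rfl
    · dsimp only
      by_cases hc : c ∈ answers
      · rw [if_neg (by have := hmaj c hc; omega)]
      · rw [if_neg (by
          have h0 : List.count c answers = 0 := List.count_eq_zero.mpr hc
          push_cast [h0]
          omega)]

-- ===== VERDICT (by name: the statement is the Claim_ definition above) =====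
theorem count_key_freq_spec : Claim_equal_count_key_freq := by
  intro rb_key _ _
  unfold Spec_count_key_freq count_key_freq count_key_freq_alt
  apply List.map_congr_left
  intro kv _
  have := perKey kv.2
  simp only at this ⊢
  rw [this]
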